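-- pv_equiv track=rewrite | github.com/ztolley/Sam2-Football-Tracker | server/src/football_tracker/tracking/interactive.py | is_player_visible
-- ===== SOURCE A (Python) =====
-- def is_player_visible(
--     frame_idx: int,
--     prompts: list[tuple[int, tuple[int, int, int, int]]],
--     offscreen_frames: set[int],
-- ) -> bool:
--     """Resolve whether the latest prompt state says the player is on-screen."""
--
--     latest_box_frame = max((prompt_frame_idx for prompt_frame_idx, _ in prompts if prompt_frame_idx <= frame_idx), default=None)
--     latest_offscreen_frame = max((offscreen_frame for offscreen_frame in offscreen_frames if offscreen_frame <= frame_idx), default=None)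
--     if latest_box_frame is None:
--         return False
--     if latest_offscreen_frame is None:
--         return True
--     return latest_box_frame >= latest_offscreen_frame
-- ===== SOURCE B (Python) =====
-- def is_player_visible(
--     frame_idx: int,
--     prompts: list[tuple[int, tuple[int, int, int, int]]],
--     offscreen_frames: set[int],
-- ) -> bool:
--     """Single tie-broken selection over one merged event timeline."""
--     events = [(prompt_frame_idx, 1) for prompt_frame_idx, _ in prompts if prompt_frame_idx <= frame_idx]
--     events += [(offscreen_frame, 0) for offscreen_frame in offscreen_frames if offscreen_frame <= frame_idx]
--     best = None
--     for event in events: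
--         if best is None or event > best:
--             best = event
--     return best is not None and best[1] == 1
-- ===== Notes on version B (the rewrite author's own statement) =====
-- stated objective: alternative
-- what changed: Replaces the two independent max-scans with None branching by a single best-event selection over one merged (frame, priority) stream where a prompt (priority 1) beats an offscreen frame (priority 0) at the same frame.
import Mathlib
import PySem

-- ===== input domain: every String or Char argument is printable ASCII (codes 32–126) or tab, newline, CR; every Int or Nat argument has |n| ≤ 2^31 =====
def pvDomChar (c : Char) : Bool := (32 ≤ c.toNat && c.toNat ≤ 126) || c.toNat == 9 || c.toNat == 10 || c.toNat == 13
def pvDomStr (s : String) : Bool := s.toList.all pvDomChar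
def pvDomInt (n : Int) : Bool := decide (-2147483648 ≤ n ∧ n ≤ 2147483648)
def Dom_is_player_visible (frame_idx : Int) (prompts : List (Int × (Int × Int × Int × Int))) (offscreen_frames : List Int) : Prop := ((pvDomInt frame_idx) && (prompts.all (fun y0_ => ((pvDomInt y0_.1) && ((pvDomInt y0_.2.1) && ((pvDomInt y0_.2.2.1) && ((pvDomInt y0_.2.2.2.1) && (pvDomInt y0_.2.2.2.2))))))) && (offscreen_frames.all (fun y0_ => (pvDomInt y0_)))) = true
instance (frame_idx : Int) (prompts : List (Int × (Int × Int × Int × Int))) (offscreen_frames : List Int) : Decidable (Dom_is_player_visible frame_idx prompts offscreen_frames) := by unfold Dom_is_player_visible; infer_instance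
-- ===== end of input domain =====

-- B replaces A's two independent max-scans by a single tie-broken best-event pass over one
-- merged (frame, priority) stream; same cost, different decomposition (objective: alternative).

-- ===== PORT A =====
def is_player_visible (frame_idx : Int) (prompts : List (Int × (Int × Int × Int × Int))) (offscreen_frames : List Int) : Bool :=
  let latest_box_frame : Option Int :=
    PySem.List.max? (prompts.filterMap (fun p => if p.1 ≤ frame_idx then some p.1 else none)) (fun x => x)
  let latest_offscreen_frame : Option Int :=
    PySem.List.max? (offscreen_frames.filter (fun f => f ≤ frame_idx)) (fun x => x)
  match latest_box_frame with
  | none => false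
  | some lb =>
    match latest_offscreen_frame with
    | none => true
    | some lo => decide (lb ≥ lo)

-- ===== PORT B =====
-- one step of B's loop: keep the best event, '>' is Python's lexicographic tuple compare
def pvBestStep (best : Option (Int × Int)) (e : Int × Int) : Option (Int × Int) :=
  match best with
  | none => some e
  | some b => if e.1 > b.1 ∨ (e.1 = b.1 ∧ e.2 > b.2) then some e else some b

def is_player_visible_alt (frame_idx : Int) (prompts : List (Int × (Int × Int × Int × Int))) (offscreen_frames : List Int) : Bool :=
  let events : List (Int × Int) :=
    prompts.filterMap (fun p => if p.1 ≤ frame_idx then some (p.1, (1 : Int)) else none)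
      ++ (offscreen_frames.filter (fun f => f ≤ frame_idx)).map (fun f => (f, (0 : Int)))
  match events.foldl pvBestStep none with
  | none => false
  | some b => b.2 == 1

-- ===== PRECONDITION & SPEC =====
def Spec_is_player_visible (frame_idx : Int) (prompts : List (Int × (Int × Int × Int × Int))) (offscreen_frames : List Int) (out : Bool) : Prop := out = is_player_visible_alt frame_idx prompts offscreen_frames
instance (frame_idx : Int) (prompts : List (Int × (Int × Int × Int × Int))) (offscreen_frames : List Int) (out : Bool) : Decidable (Spec_is_player_visible frame_idx prompts offscreen_frames out) := by unfold Spec_is_player_visible; infer_instance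

-- ===== CLAIM (what is proved, stated in full; the proofs are below) =====
def Claim_equal_is_player_visible : Prop := ∀ (frame_idx : Int) (prompts : List (Int × (Int × Int × Int × Int))) (offscreen_frames : List Int), Dom_is_player_visible frame_idx prompts offscreen_frames → Spec_is_player_visible frame_idx prompts offscreen_frames (is_player_visible frame_idx prompts offscreen_frames)

-- ===== LEMMAS AND PROOFS =====

-- the prompt-filterMap producing events factors through the frame-only filterMap
theorem pv_filterMap_factor (frame_idx : Int) (prompts : List (Int × (Int × Int × Int × Int))) :
    prompts.filterMap (fun p => if p.1 ≤ frame_idx then some (p.1, (1 : Int)) else none)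
      = (prompts.filterMap (fun p => if p.1 ≤ frame_idx then some p.1 else none)).map (fun f => (f, (1 : Int))) := by
  induction prompts with
  | nil => simp
  | cons p t ih =>
    by_cases h : p.1 ≤ frame_idx <;> simp [h, ih]

-- folding prompt events (priority 1) keeps an "(m,1)"-shaped accumulator holding the running max
theorem pv_fold_prompts (l : List Int) (a : Int) :
    List.foldl pvBestStep (some (a, (1 : Int))) (l.map (fun f => (f, (1 : Int))))
      = some (l.foldl max a, (1 : Int)) := by
  induction l generalizing a with
  | nil => simp
  | cons x t ih =>
    rw [List.map_cons, List.foldl_cons, List.foldl_cons]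
    by_cases h : x > a
    · have hstep : pvBestStep (some (a, (1:Int))) (x, (1:Int)) = some (x, 1) := by
        simp [pvBestStep, h]
      have hm : max a x = x := by omega
      rw [hstep, ih x, hm]
    · have hc : ¬ (x > a ∨ (x = a ∧ (1 : Int) > 1)) := by omega
      have hstep : pvBestStep (some (a, (1:Int))) (x, (1:Int)) = some (a, 1) := by
        simp [pvBestStep]
        omega
      have hm : max a x = a := by omega
      rw [hstep, ih a, hm]

-- folding offscreen events (priority 0) from some (b, p), p ∈ {0,1}: the frame part is the
-- running max; the priority stays 1 exactly when p = 1 and no offscreen frame exceeds b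
theorem pv_fold_off (l : List Int) (b p : Int) (hp : p = 0 ∨ p = 1) :
    List.foldl pvBestStep (some (b, p)) (l.map (fun f => (f, (0 : Int))))
      = some (l.foldl max b, if p = 1 ∧ ∀ f ∈ l, f ≤ b then (1 : Int) else 0) := by
  induction l generalizing b p with
  | nil =>
    rcases hp with hp | hp <;> subst hp <;> simp
  | cons x t ih =>
    rw [List.map_cons, List.foldl_cons, List.foldl_cons]
    by_cases h : x > b
    · have hstep : pvBestStep (some (b, p)) (x, (0:Int)) = some (x, 0) := by
        simp [pvBestStep, h]
      have h1 : ¬ (p = 1 ∧ ∀ f ∈ x :: t, f ≤ b) := by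
        rintro ⟨_, hall⟩
        have := hall x (List.mem_cons_self)
        omega
      have hm : max b x = x := by omega
      rw [hstep, ih x 0 (Or.inl rfl), hm, if_neg h1]
      simp
    · have hstep : pvBestStep (some (b, p)) (x, (0:Int)) = some (b, p) := by
        have hc : ¬ (x > b ∨ (x = b ∧ (0 : Int) > p)) := by
          rcases hp with hp | hp <;> omega
        simp [pvBestStep, hc]
      have hm : max b x = b := by omega
      rw [hstep, ih b p hp, hm]
      have hcond : (p = 1 ∧ ∀ f ∈ t, f ≤ b) ↔ (p = 1 ∧ ∀ f ∈ x :: t, f ≤ b) := by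
        rw [List.forall_mem_cons]
        constructor
        · rintro ⟨h1, hall⟩
          exact ⟨h1, by omega, hall⟩
        · rintro ⟨h1, _, hall⟩
          exact ⟨h1, hall⟩
      by_cases hq : p = 1 ∧ ∀ f ∈ t, f ≤ b
      · rw [if_pos hq, if_pos (hcond.mp hq)]
      · rw [if_neg hq, if_neg (fun hh => hq (hcond.mpr hh))]

-- Python max with no key is the running-max loop
theorem pv_max?_eq (l : List Int) :
    PySem.List.max? l (fun x => x) = (match l with | [] => none | x :: t => some (t.foldl max x)) := by
  cases l with
  | nil => simp [PySem.List.max?]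
  | cons x t => exact PySem.List.max?_id_cons x t

-- the running max is ≤ b iff the seed and every element are ≤ b
theorem pv_foldl_max_le (t : List Int) (x b : Int) :
    t.foldl max x ≤ b ↔ x ≤ b ∧ ∀ f ∈ t, f ≤ b := by
  induction t generalizing x with
  | nil => simp
  | cons y s ih =>
    rw [List.foldl_cons, ih, List.forall_mem_cons, max_le_iff]
    tauto

-- ===== VERDICT (by name: the statement is the Claim_ definition above) =====
theorem is_player_visible_spec : Claim_equal_is_player_visible := by
  intro frame_idx prompts offscreen_frames _
  unfold Spec_is_player_visible is_player_visible is_player_visible_alt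
  rw [pv_filterMap_factor]
  simp only [pv_max?_eq]
  generalize prompts.filterMap (fun p => if p.1 ≤ frame_idx then some p.1 else none) = pf
  generalize offscreen_frames.filter (fun f => f ≤ frame_idx) = of
  cases pf with
  | nil =>
    cases of with
    | nil => simp
    | cons x t =>
      rw [List.map_nil, List.nil_append, List.map_cons, List.foldl_cons]
      have hstep : pvBestStep none (x, (0:Int)) = some (x, 0) := rfl
      rw [hstep, pv_fold_off t x 0 (Or.inl rfl)]
      simp
  | cons q qt =>
    cases of with
    | nil =>
      rw [List.map_nil, List.append_nil, List.map_cons, List.foldl_cons]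
      have hstep : pvBestStep none (q, (1:Int)) = some (q, 1) := rfl
      rw [hstep, pv_fold_prompts qt q]
      simp
    | cons x t =>
      rw [List.foldl_append, List.map_cons, List.foldl_cons]
      have hstep : pvBestStep none (q, (1:Int)) = some (q, 1) := rfl
      rw [hstep, pv_fold_prompts qt q, pv_fold_off (x :: t) (qt.foldl max q) 1 (Or.inr rfl)]
      have hiff : (∀ f ∈ x :: t, f ≤ qt.foldl max q) ↔ t.foldl max x ≤ qt.foldl max q := by
        rw [pv_foldl_max_le, List.forall_mem_cons]
      by_cases hc : ∀ f ∈ x :: t, f ≤ qt.foldl max q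
      · have hle : t.foldl max x ≤ qt.foldl max q := hiff.mp hc
        rw [if_pos ⟨rfl, hc⟩]
        simp [ge_iff_le, hle]
      · have hle : ¬ t.foldl max x ≤ qt.foldl max q := fun h => hc (hiff.mpr h)
        rw [if_neg (fun hh => hc hh.2)]
        simp [ge_iff_le, hle]
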